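-- pv_equiv track=rewrite | github.com/Songhwa-Rossana/ByteDance-youth-training-camp-problems | 4.py | solution
-- ===== SOURCE A (Python) =====
-- def solution(numbers):
--
--     even_count = 1  # Initially, an empty sum (0) is considered even
--     odd_count = 0
--
--     for num_str in numbers:
--         even_digits = 0
--         odd_digits = 0
--         for digit in num_str:
--             digit = int(digit)
--             if digit % 2 == 0:
--                 even_digits += 1
--             else:
--                 odd_digits += 1
--
--         new_even_count = (even_count * even_digits) + (odd_count * odd_digits)
--         new_odd_count = (even_count * odd_digits) + (odd_count * even_digits)
--
--         even_count = new_even_count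
--         odd_count = new_odd_count
--
--     return even_count
-- ===== SOURCE B (Python) =====
-- def solution(numbers):
--     total = 1
--     diff = 1
--     for s in numbers:
--         odd = sum(int(c) % 2 for c in s)
--         even = len(s) - odd
--         total *= even + odd
--         diff *= even - odd
--     return (total + diff) // 2
-- ===== Notes on version B (the rewrite author's own statement) =====
-- stated objective: alternative
-- what changed: Replaces the step-by-step even/odd parity DP with the closed form: keep products total=prod(even+odd) and diff=prod(even-odd) and return (total+diff)//2.
import Mathlib
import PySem

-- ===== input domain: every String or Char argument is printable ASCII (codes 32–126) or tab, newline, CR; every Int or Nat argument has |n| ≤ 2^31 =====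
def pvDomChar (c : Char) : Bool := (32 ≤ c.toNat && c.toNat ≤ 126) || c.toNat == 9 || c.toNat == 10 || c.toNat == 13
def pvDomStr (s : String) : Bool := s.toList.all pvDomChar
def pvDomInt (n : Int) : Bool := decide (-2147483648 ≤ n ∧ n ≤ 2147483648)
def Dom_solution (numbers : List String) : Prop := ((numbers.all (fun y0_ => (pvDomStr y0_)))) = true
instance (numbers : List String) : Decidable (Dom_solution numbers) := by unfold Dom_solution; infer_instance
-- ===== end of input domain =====

-- B replaces A's parity DP by the closed form (prod(e+o) + prod(e-o)) // 2; same cost, different algorithm.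
-- Both Pythons call int(c) per character and raise ValueError on a non-digit character; Pre_ excludes exactly those inputs.

-- ===== PORT A =====
-- int(digit) for a single character: exact on digit characters '0'..'9' (Python raises ValueError
-- on any other character; those inputs are excluded by Pre_solution).
def digitVal (c : Char) : Int := (c.toNat : Int) - 48

def solution (numbers : List String) : Int :=
  (numbers.foldl
    (fun (st : Int × Int) num_str =>
      let eo := num_str.toList.foldl
        (fun (p : Int × Int) digit =>
          if digitVal digit % 2 = 0 then (p.1 + 1, p.2) else (p.1, p.2 + 1))
        ((0 : Int), (0 : Int))
      (st.1 * eo.1 + st.2 * eo.2, st.1 * eo.2 + st.2 * eo.1))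
    ((1 : Int), (0 : Int))).1

-- ===== PORT B =====
def solution_alt (numbers : List String) : Int :=
  let td := numbers.foldl
    (fun (td : Int × Int) s =>
      let odd : Int := s.toList.foldl (fun a c => a + digitVal c % 2) 0
      let even : Int := (s.toList.length : Int) - odd
      (td.1 * (even + odd), td.2 * (even - odd)))
    ((1 : Int), (1 : Int))
  PySem.Int.floordiv (td.1 + td.2) 2

-- ===== PRECONDITION & SPEC =====
-- Pre_ excludes exactly the inputs containing a non-digit character, on which both Pythons raise ValueError.
def Pre_solution (numbers : List String) : Prop :=
  (numbers.all (fun s => s.toList.all (fun c => c.isDigit))) = true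
instance (numbers : List String) : Decidable (Pre_solution numbers) := by
  unfold Pre_solution; infer_instance

def pvWitness_solution : List String := (["12", "3"])

def Spec_solution (numbers : List String) (out : Int) : Prop := out = solution_alt numbers
instance (numbers : List String) (out : Int) : Decidable (Spec_solution numbers out) := by unfold Spec_solution; infer_instance

-- ===== CLAIM (what is proved, stated in full; the proofs are below) =====
def Claim_equal_solution : Prop := ∀ (numbers : List String), Dom_solution numbers → Pre_solution numbers → Spec_solution numbers (solution numbers)

-- ===== LEMMAS AND PROOFS =====

-- digitVal c % 2 is always 0 or 1 (Int.emod with positive divisor is nonnegative)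
theorem digitVal_mod_two (c : Char) : digitVal c % 2 = 0 ∨ digitVal c % 2 = 1 := by
  have h1 : 0 ≤ digitVal c % 2 := Int.emod_nonneg _ (by norm_num)
  have h2 : digitVal c % 2 < 2 := Int.emod_lt_of_pos _ (by norm_num)
  omega

-- A's inner loop: the two counters sum to the length of the string
theorem innerA_sum (cs : List Char) : ∀ (e o : Int),
    ((cs.foldl (fun (p : Int × Int) c =>
        if digitVal c % 2 = 0 then (p.1 + 1, p.2) else (p.1, p.2 + 1)) (e, o)).1
     + (cs.foldl (fun (p : Int × Int) c =>
        if digitVal c % 2 = 0 then (p.1 + 1, p.2) else (p.1, p.2 + 1)) (e, o)).2)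
    = e + o + cs.length := by
  induction cs with
  | nil => intro e o; simp
  | cons c cs ih =>
    intro e o
    by_cases h : digitVal c % 2 = 0 <;>
      simp only [List.foldl_cons, h, if_pos, if_neg, not_false_iff, List.length_cons] <;>
      rw [ih] <;> push_cast <;> ring

-- shifting the accumulator of B's parity sum
theorem sumShift (cs : List Char) : ∀ (a : Int),
    cs.foldl (fun a c => a + digitVal c % 2) a
    = a + cs.foldl (fun a c => a + digitVal c % 2) 0 := by
  induction cs with
  | nil => intro a; simp
  | cons c cs ih =>
    intro a
    simp only [List.foldl_cons]
    rw [ih (a + digitVal c % 2), ih (0 + digitVal c % 2)]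
    ring

-- A's odd counter equals B's running sum of digit parities
theorem innerA_snd (cs : List Char) : ∀ (e o : Int),
    (cs.foldl (fun (p : Int × Int) c =>
        if digitVal c % 2 = 0 then (p.1 + 1, p.2) else (p.1, p.2 + 1)) (e, o)).2
    = o + cs.foldl (fun a c => a + digitVal c % 2) 0 := by
  induction cs with
  | nil => intro e o; simp
  | cons c cs ih =>
    intro e o
    rcases digitVal_mod_two c with h | h <;>
      simp only [List.foldl_cons, h, if_pos, if_neg, one_ne_zero, not_false_iff,
        zero_add, add_zero] <;> rw [ih]
    rw [sumShift cs 1]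
    ring

-- Outer invariant: B's (total, diff) state equals (e+o, e-o) of A's state, for every prefix.
theorem outer_inv (l : List String) : ∀ (e o : Int),
    (l.foldl
      (fun (td : Int × Int) s =>
        let odd : Int := s.toList.foldl (fun a c => a + digitVal c % 2) 0
        let even : Int := (s.toList.length : Int) - odd
        (td.1 * (even + odd), td.2 * (even - odd)))
      (e + o, e - o))
    = (((l.foldl
        (fun (st : Int × Int) num_str =>
          let eo := num_str.toList.foldl
            (fun (p : Int × Int) digit =>
              if digitVal digit % 2 = 0 then (p.1 + 1, p.2) else (p.1, p.2 + 1))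
            ((0 : Int), (0 : Int))
          (st.1 * eo.1 + st.2 * eo.2, st.1 * eo.2 + st.2 * eo.1)) (e, o)).1
      + (l.foldl
        (fun (st : Int × Int) num_str =>
          let eo := num_str.toList.foldl
            (fun (p : Int × Int) digit =>
              if digitVal digit % 2 = 0 then (p.1 + 1, p.2) else (p.1, p.2 + 1))
            ((0 : Int), (0 : Int))
          (st.1 * eo.1 + st.2 * eo.2, st.1 * eo.2 + st.2 * eo.1)) (e, o)).2),
      ((l.foldl
        (fun (st : Int × Int) num_str =>
          let eo := num_str.toList.foldl
            (fun (p : Int × Int) digit =>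
              if digitVal digit % 2 = 0 then (p.1 + 1, p.2) else (p.1, p.2 + 1))
            ((0 : Int), (0 : Int))
          (st.1 * eo.1 + st.2 * eo.2, st.1 * eo.2 + st.2 * eo.1)) (e, o)).1
      - (l.foldl
        (fun (st : Int × Int) num_str =>
          let eo := num_str.toList.foldl
            (fun (p : Int × Int) digit =>
              if digitVal digit % 2 = 0 then (p.1 + 1, p.2) else (p.1, p.2 + 1))
            ((0 : Int), (0 : Int))
          (st.1 * eo.1 + st.2 * eo.2, st.1 * eo.2 + st.2 * eo.1)) (e, o)).2)) := by
  induction l with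
  | nil => intro e o; simp
  | cons s l ih =>
    intro e o
    simp only [List.foldl_cons]
    set E := (s.toList.foldl (fun (p : Int × Int) digit =>
        if digitVal digit % 2 = 0 then (p.1 + 1, p.2) else (p.1, p.2 + 1))
        ((0 : Int), (0 : Int))).1 with hE
    set O := (s.toList.foldl (fun (p : Int × Int) digit =>
        if digitVal digit % 2 = 0 then (p.1 + 1, p.2) else (p.1, p.2 + 1))
        ((0 : Int), (0 : Int))).2 with hO
    have hsum : E + O = (s.toList.length : Int) := by
      have := innerA_sum s.toList 0 0; rw [← hE, ← hO] at this; omega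
    have hodd : s.toList.foldl (fun a c => a + digitVal c % 2) 0 = O := by
      have := innerA_snd s.toList 0 0; rw [← hO] at this; omega
    have h1 : (e + o) * (((s.toList.length : Int) - s.toList.foldl (fun a c => a + digitVal c % 2) 0)
        + s.toList.foldl (fun a c => a + digitVal c % 2) 0)
        = (e * E + o * O) + (e * O + o * E) := by
      rw [hodd]
      have hx : (s.toList.length : Int) - O + O = E + O := by omega
      rw [hx]; ring
    have h2 : (e - o) * (((s.toList.length : Int) - s.toList.foldl (fun a c => a + digitVal c % 2) 0)
        - s.toList.foldl (fun a c => a + digitVal c % 2) 0)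
        = (e * E + o * O) - (e * O + o * E) := by
      rw [hodd]
      have hx : (s.toList.length : Int) - O - O = E - O := by omega
      rw [hx]; ring
    calc _ = (List.foldl _ ((e * E + o * O) + (e * O + o * E), (e * E + o * O) - (e * O + o * E)) l) := by
              rw [← h1, ← h2]
         _ = _ := ih (e * E + o * O) (e * O + o * E)

-- ===== VERDICT (by name: the statement is the Claim_ definition above) =====
theorem solution_spec : Claim_equal_solution := by
  intro numbers _ _
  unfold Spec_solution solution solution_alt
  have h := outer_inv numbers 1 0
  simp only [add_zero, sub_zero] at h
  simp only [h]
  set E := (numbers.foldl _ ((1 : Int), (0 : Int))).1 with hE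
  set O := (numbers.foldl _ ((1 : Int), (0 : Int))).2 with hO
  have h2 : E + O + (E - O) = 2 * E := by ring
  rw [h2, PySem.Int.floordiv_eq_ediv_of_pos (by norm_num)]
  omega
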